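-- pv_equiv track=rewrite | github.com/TechnoFuture2020/NIX_education_Task_9 | NIX_Task_9.py | get_filtered_list
-- ===== SOURCE A (Python) =====
-- def get_filtered_list(main_list, elem_to_del_list):
-- 	i = 0
--
-- 	while len(elem_to_del_list) > 0:
-- 		if main_list[i] in elem_to_del_list:
-- 			elem_to_del_list.remove(main_list[i])
-- 			main_list.remove(main_list[i])
-- 		else:
-- 			i += 1
--
-- 	return main_list
-- ===== SOURCE B (Python) =====
-- def get_filtered_list(main_list, elem_to_del_list):
--     need = {}
--     for v in elem_to_del_list:
--         need[v] = need.get(v, 0) + 1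
--     out = []
--     for v in main_list:
--         if need.get(v, 0) > 0:
--             need[v] = need.get(v, 0) - 1
--         else:
--             out.append(v)
--     if any(need.values()):
--         raise ValueError("element to delete not found in main_list")
--     return out
-- ===== Notes on version B (the rewrite author's own statement) =====
-- stated objective: faster
-- what changed: A repeatedly scans and mutates both lists with 'in'/.remove inside a while loop (and mutates its arguments); B builds a count dictionary of elem_to_del_list once and filters main_list in a single pass, decrementing counts, raising ValueError (where A raises IndexError, outside Pre_) if some element cannot be deleted.
import Mathlib
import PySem

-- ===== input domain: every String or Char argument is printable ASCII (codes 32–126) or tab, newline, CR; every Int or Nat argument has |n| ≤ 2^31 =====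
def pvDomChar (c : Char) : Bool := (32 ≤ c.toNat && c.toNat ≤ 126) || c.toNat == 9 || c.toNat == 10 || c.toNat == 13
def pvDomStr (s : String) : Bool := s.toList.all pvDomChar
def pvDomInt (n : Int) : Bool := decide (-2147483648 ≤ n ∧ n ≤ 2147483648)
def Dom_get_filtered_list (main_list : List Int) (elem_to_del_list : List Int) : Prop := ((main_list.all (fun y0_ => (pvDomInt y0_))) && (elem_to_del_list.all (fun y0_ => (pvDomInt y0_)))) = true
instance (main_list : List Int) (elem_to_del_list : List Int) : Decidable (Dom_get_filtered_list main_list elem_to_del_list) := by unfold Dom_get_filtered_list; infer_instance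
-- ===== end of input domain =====

-- B replaces A's quadratic scan-and-remove while-loop by a one-pass counter filter (asymptotically faster);
-- A mutates both of its argument lists in place, B does not — the equivalence proved here is about the return value only.
-- Where deletion is impossible A raises IndexError and B raises ValueError; those inputs are outside Pre_.


-- ===== PORT A =====
-- While-loop of A as recursion on the state (main, del, i); `[]` in the pyGet? = none arm is the
-- IndexError (excluded by Pre_); the unreachable-looking `.getD` defaults only make `remove?` total.
def pvALoop (main_list : List Int) (elem_to_del_list : List Int) (i : Nat) : List Int :=
  if 0 < elem_to_del_list.length then
    match h : PySem.List.pyGet? main_list (i : Int) with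
    | none => []
    | some v =>
      if hv : v ∈ elem_to_del_list then
        pvALoop ((PySem.List.remove? main_list v).getD main_list)
                ((PySem.List.remove? elem_to_del_list v).getD elem_to_del_list) i
      else
        pvALoop main_list elem_to_del_list (i + 1)
  else main_list
termination_by (elem_to_del_list.length, main_list.length - i)
decreasing_by
  · apply Prod.Lex.left
    rw [PySem.List.remove?_eq_some_erase _ _ hv]
    have h1 := List.length_erase_of_mem hv
    simp only [Option.getD_some]
    omega
  · apply Prod.Lex.right
    have hlt : i < main_list.length := by
      by_contra hge
      rw [PySem.List.pyGet?_natCast] at h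
      simp [List.getElem?_eq_none (by omega : main_list.length ≤ i)] at h
    omega

def get_filtered_list (main_list : List Int) (elem_to_del_list : List Int) : List Int :=
  pvALoop main_list elem_to_del_list 0

-- ===== PORT B =====
-- B's final any()-check raises ValueError exactly outside Pre_ (some count still positive); inside Pre_
-- it never fires, so the port returns the accumulated list directly.
def get_filtered_list_alt (main_list : List Int) (elem_to_del_list : List Int) : List Int :=
  let need := elem_to_del_list.foldl (fun d v => d.insert v (d.getD v 0 + 1)) PySem.Dict.empty
  let res := main_list.foldl
    (fun (s : PySem.Dict Int Int × List Int) v =>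
      if s.1.getD v 0 > 0 then (s.1.insert v (s.1.getD v 0 - 1), s.2)
      else (s.1, s.2 ++ [v]))
    (need, [])
  res.2

-- ===== PRECONDITION & SPEC =====
-- A returns normally exactly when elem_to_del_list is, as a multiset, contained in main_list;
-- otherwise its index runs past the end of main_list and it raises IndexError.
def Pre_get_filtered_list (main_list : List Int) (elem_to_del_list : List Int) : Prop :=
  ∀ v ∈ elem_to_del_list, elem_to_del_list.count v ≤ main_list.count v
instance (main_list : List Int) (elem_to_del_list : List Int) : Decidable (Pre_get_filtered_list main_list elem_to_del_list) := by unfold Pre_get_filtered_list; infer_instance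

def pvWitness_get_filtered_list : List Int × List Int := ([1, 2, 2, 3], [2, 3])

def Spec_get_filtered_list (main_list : List Int) (elem_to_del_list : List Int) (out : List Int) : Prop := out = get_filtered_list_alt main_list elem_to_del_list
instance (main_list : List Int) (elem_to_del_list : List Int) (out : List Int) : Decidable (Spec_get_filtered_list main_list elem_to_del_list out) := by unfold Spec_get_filtered_list; infer_instance

-- ===== CLAIM (what is proved, stated in full; the proofs are below) =====
def Claim_equal_get_filtered_list : Prop := ∀ (main_list : List Int) (elem_to_del_list : List Int), Dom_get_filtered_list main_list elem_to_del_list → Pre_get_filtered_list main_list elem_to_del_list → Spec_get_filtered_list main_list elem_to_del_list (get_filtered_list main_list elem_to_del_list)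


-- ===== LEMMAS AND PROOFS =====

-- Reference function: remove from `rest` one occurrence of each element of the multiset `d`, keep the others.
def pvMsub : List Int → List Int → List Int
  | [], _ => []
  | v :: rest, d => if v ∈ d then pvMsub rest (d.erase v) else v :: pvMsub rest d

theorem pvMsub_nil_right (rest : List Int) : pvMsub rest [] = rest := by
  induction rest with
  | nil => rfl
  | cons v r ih => simp [pvMsub, ih]

-- B's filtering fold computes pvMsub, for any dict d representing the multiset m by counts.
theorem pvBFold_eq (rest : List Int) (d : PySem.Dict Int Int) (m : List Int) (acc : List Int)
    (hR : ∀ v, d.getD v 0 = (m.count v : Int)) :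
    (rest.foldl
      (fun (s : PySem.Dict Int Int × List Int) v =>
        if s.1.getD v 0 > 0 then (s.1.insert v (s.1.getD v 0 - 1), s.2)
        else (s.1, s.2 ++ [v]))
      (d, acc)).2 = acc ++ pvMsub rest m := by
  induction rest generalizing d m acc with
  | nil => simp [pvMsub]
  | cons v r ih =>
    by_cases hm : v ∈ m
    · have hpos : 0 < m.count v := List.count_pos_iff.mpr hm
      have hd : d.getD v 0 > 0 := by rw [hR v]; exact_mod_cast hpos
      simp only [List.foldl_cons]
      rw [if_pos hd, pvMsub, if_pos hm, ih (d.insert v (d.getD v 0 - 1)) (m.erase v) acc]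
      intro w
      rw [PySem.Dict.getD_insert]
      by_cases hw : w = v
      · rw [if_pos hw, hw, hR v, List.count_erase_self]
        have h1 : 1 ≤ m.count v := hpos
        push_cast [Nat.cast_sub h1]
        ring
      · rw [if_neg hw, hR w, List.count_erase_of_ne hw]
    · have hz : m.count v = 0 := List.count_eq_zero.mpr hm
      have hd : ¬ d.getD v 0 > 0 := by rw [hR v, hz]; norm_num
      simp only [List.foldl_cons]
      rw [if_neg hd, pvMsub, if_neg hm, ih d m (acc ++ [v]) hR, List.append_assoc]
      rfl

theorem pvB_eq_msub (main_list elem_to_del_list : List Int) :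
    get_filtered_list_alt main_list elem_to_del_list = pvMsub main_list elem_to_del_list := by
  unfold get_filtered_list_alt
  rw [PySem.Dict.foldl_insert_getD_add_one_eq_counter]
  exact pvBFold_eq main_list _ elem_to_del_list []
    (fun v => PySem.Dict.getD_counter elem_to_del_list v)

-- A's loop, started at state (pre ++ rest, del, |pre|) with pre disjoint from del and del
-- multiset-contained in rest, returns pre ++ pvMsub rest del.
theorem pvALoop_eq (n : Nat) : ∀ (del pre rest : List Int),
    del.length + rest.length = n →
    (∀ v ∈ del, v ∉ pre) →
    (∀ v ∈ del, del.count v ≤ rest.count v) →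
    pvALoop (pre ++ rest) del pre.length = pre ++ pvMsub rest del := by
  induction n using Nat.strong_induction_on with
  | _ n ih =>
    intro del pre rest hn hdis hcnt
    match hdel : del with
    | [] =>
      rw [pvALoop]
      simp [pvMsub_nil_right]
    | d0 :: del' =>
      match hrest : rest with
      | [] =>
        exfalso
        have h1 := hcnt d0 (by simp)
        simp at h1
      | v :: rest' =>
        rw [pvALoop]
        have hlen : 0 < (d0 :: del').length := by simp
        rw [if_pos hlen]
        have hget : PySem.List.pyGet? (pre ++ v :: rest') ((pre.length : Nat) : Int) = some v :=
          PySem.List.pyGet?_append_length pre rest' v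
        split
        next heq => rw [hget] at heq; simp at heq
        next v1 heq =>
        rw [hget] at heq
        injection heq with hv1
        subst hv1
        by_cases hv : v ∈ d0 :: del'
        · rw [dif_pos hv]
          have hvm : v ∈ pre ++ v :: rest' := by simp
          rw [PySem.List.remove?_eq_some_erase _ _ hvm, PySem.List.remove?_eq_some_erase _ _ hv]
          simp only [Option.getD_some]
          have hvpre : v ∉ pre := hdis v hv
          rw [List.erase_append_right _ hvpre, List.erase_cons_head]
          have hrec : pvALoop (pre ++ rest') ((d0 :: del').erase v) pre.length
              = pre ++ pvMsub rest' ((d0 :: del').erase v) := by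
            refine ih (((d0 :: del').erase v).length + rest'.length) ?_ _ _ _ rfl ?_ ?_
            · rw [List.length_erase_of_mem hv]
              simp at hn ⊢; omega
            · intro w hw; exact hdis w (List.mem_of_mem_erase hw)
            · intro w hw
              by_cases hwv : w = v
              · rw [hwv, List.count_erase_self]
                have := hcnt v hv
                simp [List.count_cons] at this ⊢
                omega
              · rw [List.count_erase_of_ne hwv]
                have := hcnt w (List.mem_of_mem_erase hw)
                have h2 : List.count w (v :: rest') = List.count w rest' := by
                  rw [List.count_cons_of_ne (Ne.symm hwv)]
                exact h2 ▸ this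
          rw [hrec, pvMsub, if_pos hv]
        · rw [dif_neg hv]
          have hrec : pvALoop ((pre ++ [v]) ++ rest') (d0 :: del') (pre ++ [v]).length
              = (pre ++ [v]) ++ pvMsub rest' (d0 :: del') := by
            refine ih ((d0 :: del').length + rest'.length) ?_ _ _ _ rfl ?_ ?_
            · simp at hn ⊢; omega
            · intro w hw
              simp only [List.mem_append, List.mem_singleton]
              rintro (hwp | hwv)
              · exact hdis w hw hwp
              · subst hwv; exact hv hw
            · intro w hw
              have := hcnt w hw
              have hwv : w ≠ v := fun he => hv (he ▸ hw)
              have h2 : List.count w (v :: rest') = List.count w rest' := by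
                rw [List.count_cons_of_ne (Ne.symm hwv)]
              exact h2 ▸ this
          simp only [List.append_assoc, List.singleton_append, List.length_append,
            List.length_cons, List.length_nil] at hrec
          rw [show pre.length + (0 + 1) = pre.length + 1 from by omega] at hrec
          rw [hrec, pvMsub, if_neg hv]

-- ===== VERDICT (by name: the statement is the Claim_ definition above) =====
theorem get_filtered_list_spec : Claim_equal_get_filtered_list := by
  intro main_list elem_to_del_list _ hpre
  unfold Spec_get_filtered_list
  rw [pvB_eq_msub]
  have := pvALoop_eq (elem_to_del_list.length + main_list.length)
    elem_to_del_list [] main_list rfl (by simp) hpre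
  simpa [get_filtered_list] using this
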